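-- pv_equiv track=rewrite | github.com/myfreess/unicode_tablegen | src/printable.py | compress_singletons
-- ===== SOURCE A (Python) =====
-- from typing import Generator, Iterable, NamedTuple, Tuple
--
-- def compress_singletons(singletons: list[int]) -> Tuple[list[Tuple[int, int]], list[int]]:
--     uppers: list[Tuple[int, int]] = []  # (upper, # items in lowers)
--     lowers: list[int] = []
--
--     for i in singletons:
--         upper = i >> 8
--         lower = i & 0xFF
--         if len(uppers) == 0 or uppers[-1][0] != upper:
--             uppers.append((upper, 1))
--         else:
--             upper, count = uppers[-1]
--             uppers[-1] = upper, count + 1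
--         lowers.append(lower)
--
--     return uppers, lowers
-- ===== SOURCE B (Python) =====
-- from typing import Tuple
--
--
-- def compress_singletons(singletons: list) -> Tuple[list, list]:
--     # Boundary-index algorithm: find the positions where a new high-byte run
--     # starts (index 0 plus every adjacent pair that differs), then obtain each
--     # run length by subtracting consecutive start positions, instead of
--     # counting incrementally.
--     his = [i >> 8 for i in singletons]
--     lowers = [i & 0xFF for i in singletons]
--     changes = [(j + 1, b) for j, (a, b) in enumerate(zip(his, his[1:])) if a != b]
--     starts = ([(0, his[0])] if his else []) + changes
--     ends = [s for s, _ in starts[1:]] + [len(his)]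
--     uppers = [(h, e - s) for (s, h), e in zip(starts, ends)]
--     return uppers, lowers
-- ===== Notes on version B (the rewrite author's own statement) =====
-- stated objective: alternative
-- what changed: Replaces A's single-pass accumulator that increments the count stored in the last uppers entry with a boundary-index algorithm: it computes the list of positions where the high byte changes and obtains each run length by subtracting consecutive start positions.
import Mathlib
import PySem

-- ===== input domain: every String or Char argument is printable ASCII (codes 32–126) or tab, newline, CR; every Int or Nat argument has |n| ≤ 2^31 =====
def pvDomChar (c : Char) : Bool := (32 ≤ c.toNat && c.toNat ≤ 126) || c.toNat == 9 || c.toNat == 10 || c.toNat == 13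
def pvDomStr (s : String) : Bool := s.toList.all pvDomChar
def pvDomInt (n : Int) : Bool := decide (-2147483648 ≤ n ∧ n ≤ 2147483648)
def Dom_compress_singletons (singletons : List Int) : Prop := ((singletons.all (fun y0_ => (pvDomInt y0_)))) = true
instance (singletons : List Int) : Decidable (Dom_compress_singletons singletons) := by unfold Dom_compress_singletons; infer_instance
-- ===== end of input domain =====

-- B replaces A's single pass that mutates the last uppers entry with a boundary-index
-- algorithm: it locates the positions where the high byte changes and derives each run
-- length by subtracting consecutive start positions (alternative decomposition).


-- ===== PORT A =====
-- shared byte decomposition (i >> 8 and i & 0xFF, Python-exact)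
def pvHigh (i : Int) : Int := i >>> (8 : Nat)
def pvLow (i : Int) : Int := PySem.Int.band i 255

-- A-side helper: the update of `uppers` for one element's high byte (the if/else in A's loop body)
def pvUpStep (uppers : List (Int × Int)) (upper : Int) : List (Int × Int) :=
  match uppers.getLast? with
  | none => uppers ++ [(upper, 1)]
  | some (u, count) =>
    if u ≠ upper then uppers ++ [(upper, 1)]
    else uppers.dropLast ++ [(u, count + 1)]

-- one iteration of A's loop over (uppers, lowers)
def pvStep (st : (List (Int × Int)) × List Int) (i : Int) : (List (Int × Int)) × List Int :=
  let upper := pvHigh i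
  let lower := pvLow i
  (pvUpStep st.1 upper, st.2 ++ [lower])

def compress_singletons (singletons : List Int) : (List (Int × Int)) × List Int :=
  singletons.foldl pvStep ([], [])

-- ===== PORT B =====
-- B-side helper: the `changes` comprehension — (j+1, b) for each adjacent pair (a, b) with a ≠ b
def pvChanges (his : List Int) : List (Int × Int) :=
  (PySem.List.enumerate (his.zip (PySem.List.slice his (some 1) none))).filterMap
    (fun p => if p.2.1 ≠ p.2.2 then some (p.1 + 1, p.2.2) else none)

-- B-side helper: `[(0, his[0])] if his else []`
def pvFirstStart (his : List Int) : List (Int × Int) :=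
  match his with
  | [] => []
  | h :: _ => [(0, h)]

def compress_singletons_alt (singletons : List Int) : (List (Int × Int)) × List Int :=
  let his := singletons.map pvHigh
  let lowers := singletons.map pvLow
  let changes := pvChanges his
  let starts := pvFirstStart his ++ changes
  let ends := (PySem.List.slice starts (some 1) none).map (·.1) ++ [(his.length : Int)]
  let uppers := (starts.zip ends).map (fun q => (q.1.2, q.2 - q.1.1))
  (uppers, lowers)

-- ===== PRECONDITION & SPEC =====
def Spec_compress_singletons (singletons : List Int) (out : (List (Int × Int)) × List Int) : Prop := out = compress_singletons_alt singletons
instance (singletons : List Int) (out : (List (Int × Int)) × List Int) : Decidable (Spec_compress_singletons singletons out) := by unfold Spec_compress_singletons; infer_instance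

-- ===== CLAIM =====
def Claim_equal_compress_singletons : Prop := ∀ (singletons : List Int), Dom_compress_singletons singletons → Spec_compress_singletons singletons (compress_singletons singletons)

-- ===== LEMMAS AND PROOFS =====

-- run-length encoding: the common reference both ports are reduced to
def pvRle : List Int → List (Int × Int)
  | [] => []
  | x :: xs =>
    (x, 1 + ((xs.takeWhile (· == x)).length : Int)) :: pvRle (xs.dropWhile (· == x))
termination_by l => l.length
decreasing_by
  simpa using Nat.lt_succ_of_le (List.length_dropWhile_le _ _)

-- proof helper (A side): run-length encoding with an open run (u, c) at the front
def pvRleAux (u : Int) (c : Int) : List Int → List (Int × Int)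
  | [] => [(u, c)]
  | x :: xs => if x == u then pvRleAux u (c + 1) xs else (u, c) :: pvRleAux x 1 xs

theorem foldl_pvUpStep_concat (xs : List Int) :
    ∀ (pre : List (Int × Int)) (u c : Int),
      List.foldl pvUpStep (pre ++ [(u, c)]) xs = pre ++ pvRleAux u c xs := by
  induction xs with
  | nil => intro pre u c; simp [pvRleAux]
  | cons x xs ih =>
    intro pre u c
    by_cases h : x = u
    · subst h
      simp only [List.foldl_cons, pvUpStep, List.getLast?_concat, List.dropLast_concat]
      simp [pvRleAux, ih]
    · have hne : u ≠ x := fun h' => h h'.symm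
      simp only [List.foldl_cons, pvUpStep, List.getLast?_concat]
      rw [if_pos hne]
      have := ih (pre ++ [(u, c)]) x 1
      simp only [List.append_assoc] at this ⊢
      rw [this]
      simp [pvRleAux, h]

theorem pvRleAux_eq (xs : List Int) :
    ∀ (u c : Int),
      pvRleAux u c xs
        = (u, c + ((xs.takeWhile (· == u)).length : Int)) :: pvRle (xs.dropWhile (· == u)) := by
  induction xs with
  | nil => intro u c; simp [pvRleAux, pvRle]
  | cons x xs ih =>
    intro u c
    by_cases h : x = u
    · subst h
      simp only [pvRleAux, beq_self_eq_true, if_true, List.takeWhile_cons,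
        List.dropWhile_cons, ih, List.length_cons, List.cons.injEq, Prod.mk.injEq]
      refine ⟨⟨trivial, by push_cast; ring⟩, trivial⟩
    · have hb : (x == u) = false := beq_eq_false_iff_ne.mpr h
      simp only [pvRleAux, hb, List.takeWhile_cons, List.dropWhile_cons, if_false,
        Bool.false_eq_true]
      rw [ih x 1]
      simp [pvRle]

theorem foldl_pvStep_split (xs : List Int) :
    ∀ (us : List (Int × Int)) (ls : List Int),
      List.foldl pvStep (us, ls) xs
        = (List.foldl pvUpStep us (xs.map pvHigh),
           ls ++ xs.map pvLow) := by
  induction xs with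
  | nil => intro us ls; simp
  | cons x xs ih =>
    intro us ls
    simp [pvStep, ih, List.append_assoc]

theorem foldl_pvUpStep_nil (ms : List Int) :
    List.foldl pvUpStep [] ms = pvRle ms := by
  cases ms with
  | nil => simp [pvRle]
  | cons m ms =>
    have h0 : pvUpStep [] m = [] ++ [(m, 1)] := by simp [pvUpStep]
    rw [List.foldl_cons, h0, foldl_pvUpStep_concat, pvRleAux_eq]
    simp [pvRle]

-- B side: the uppers pipeline as a function of the high-byte list
def pvShift (l : List (Int × Int)) : List (Int × Int) := l.map (fun p => (p.1 + 1, p.2))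

def pvStarts (his : List Int) : List (Int × Int) := pvFirstStart his ++ pvChanges his

-- abstract pairing: zip the starts with the shifted starts (closed by n) and subtract
def pvPairUp (S : List (Int × Int)) (n : Int) : List (Int × Int) :=
  (S.zip (S.tail.map (·.1) ++ [n])).map (fun q => (q.1.2, q.2 - q.1.1))

def pvUppers (his : List Int) : List (Int × Int) :=
  pvPairUp (pvStarts his) (his.length : Int)

theorem compress_alt_eq (s : List Int) :
    compress_singletons_alt s = (pvUppers (s.map pvHigh), s.map pvLow) := by
  simp [compress_singletons_alt, pvUppers, pvPairUp, pvStarts, PySem.List.slice_from_one]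

theorem enum_filter_shift (L : List (Int × Int)) :
    ∀ (s : Int),
      (PySem.List.enumerate L (s + 1)).filterMap
          (fun p => if p.2.1 = p.2.2 then none else some (p.1 + 1, p.2.2))
        = ((PySem.List.enumerate L s).filterMap
          (fun p => if p.2.1 = p.2.2 then none else some (p.1 + 1, p.2.2))).map
            (fun p => (p.1 + 1, p.2)) := by
  induction L with
  | nil => intro s; simp [PySem.List.enumerate_nil]
  | cons q Q ih =>
    intro s
    simp only [PySem.List.enumerate_cons, List.filterMap_cons]
    by_cases hq : q.1 = q.2
    · simp only [hq, reduceIte]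
      exact ih (s + 1)
    · simp only [hq, reduceIte, List.map_cons]
      rw [ih (s + 1)]

theorem pvChanges_cons (x : Int) (xs : List Int) :
    pvChanges (x :: xs)
      = (match xs with
         | [] => []
         | h :: _ => if x ≠ h then [(1, h)] else []) ++ pvShift (pvChanges xs) := by
  cases xs with
  | nil => simp [pvChanges, pvShift, PySem.List.slice_from_one]
  | cons h t =>
    by_cases hx : x = h
    · simp only [pvChanges, pvShift, PySem.List.slice_from_one, List.tail_cons,
        List.zip_cons_cons, PySem.List.enumerate_cons, List.filterMap_cons,
        hx, ne_eq, not_true_eq_false, reduceIte, List.nil_append]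
      simpa using enum_filter_shift ((h :: t).zip t) 0
    · simp only [pvChanges, pvShift, PySem.List.slice_from_one, List.tail_cons,
        List.zip_cons_cons, PySem.List.enumerate_cons, List.filterMap_cons,
        ne_eq, hx, not_false_eq_true, reduceIte, List.singleton_append]
      rw [show ((0 : Int) + 1) = 1 from rfl]
      congr 1
      simp only [ite_not]
      simpa using enum_filter_shift ((h :: t).zip t) 0

-- the pvPairUp recurrence on a cons
theorem pvPairUp_cons (s hh : Int) (S : List (Int × Int)) (n : Int) :
    pvPairUp ((s, hh) :: S) n
      = (hh, (match S with | [] => n | (s2, _) :: _ => s2) - s) :: pvPairUp S n := by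
  cases S with
  | nil => simp [pvPairUp]
  | cons p P => cases p; simp [pvPairUp]

-- shifting every start by one and the closing bound by one leaves the result unchanged
theorem pvPairUp_shift (S : List (Int × Int)) (n : Int) :
    pvPairUp (pvShift S) (n + 1) = pvPairUp S n := by
  induction S with
  | nil => simp [pvPairUp, pvShift]
  | cons p P ih =>
    cases p with
    | mk s hh =>
      have hs : pvShift ((s, hh) :: P) = (s + 1, hh) :: pvShift P := by simp [pvShift]
      rw [hs, pvPairUp_cons, pvPairUp_cons, ih]
      cases P with
      | nil => simp [pvShift]; try ring
      | cons q Q =>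
        cases q
        simp [pvShift]
        try ring

-- the pvRle recurrence on a cons
theorem pvRle_cons_ne (x h : Int) (t : List Int) (hxh : x ≠ h) :
    pvRle (x :: h :: t) = (x, 1) :: pvRle (h :: t) := by
  have hb : (h == x) = false := beq_eq_false_iff_ne.mpr (fun e => hxh e.symm)
  rw [pvRle]
  simp [hb, pvRle]

theorem pvRle_cons_eq (x : Int) (t : List Int) :
    pvRle (x :: x :: t)
      = match pvRle (x :: t) with
        | [] => []
        | (u, c) :: r => (u, c + 1) :: r := by
  rw [pvRle, pvRle]
  simp only [List.takeWhile_cons, beq_self_eq_true, if_true, List.dropWhile_cons,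
    List.length_cons]
  push_cast
  ring_nf

-- main B-side lemma: the boundary pipeline computes the run-length encoding
theorem pvUppers_eq_pvRle (his : List Int) : pvUppers his = pvRle his := by
  induction his with
  | nil => simp [pvUppers, pvStarts, pvFirstStart, pvChanges, pvPairUp, pvRle,
      PySem.List.slice_from_one, PySem.List.enumerate_nil]
  | cons x xs ih =>
    cases xs with
    | nil =>
      simp [pvUppers, pvStarts, pvFirstStart, pvChanges, pvPairUp, pvRle,
        PySem.List.slice_from_one, PySem.List.enumerate_nil]
    | cons h t =>
      by_cases hx : x = h
      · -- same run continues: first count grows by one, tail unchanged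
        subst hx
        rw [pvRle_cons_eq, ← ih]
        have hst : pvStarts (x :: x :: t) = (0, x) :: pvShift (pvChanges (x :: t)) := by
          simp [pvStarts, pvFirstStart, pvChanges_cons]
        have hst' : pvStarts (x :: t) = (0, x) :: pvChanges (x :: t) := by
          simp [pvStarts, pvFirstStart]
        rw [pvUppers, pvUppers, hst, hst']
        have hlen : ((x :: x :: t).length : Int) = ((x :: t).length : Int) + 1 := by
          simp
        rw [hlen, pvPairUp_cons, pvPairUp_cons, pvPairUp_shift]
        cases hc : pvChanges (x :: t) with
        | nil => simp [pvShift, pvPairUp]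
        | cons c cs =>
          cases c
          simp only [pvShift, List.map_cons]
          ring_nf
      · -- a new run starts: emit (x, 1) and keep the rest
        rw [pvRle_cons_ne x h t hx, ← ih]
        have hst : pvStarts (x :: h :: t) = (0, x) :: pvShift (pvStarts (h :: t)) := by
          simp only [pvStarts, pvFirstStart, pvChanges_cons, pvShift, List.map_append,
            List.map_cons, List.singleton_append]
          rw [if_pos hx]
          rfl
        rw [pvUppers, pvUppers, hst]
        have hlen : ((x :: h :: t).length : Int) = (((h :: t).length : Int)) + 1 := by
          simp
        rw [hlen, pvPairUp_cons, pvPairUp_shift]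
        have hhd : pvShift (pvStarts (h :: t)) = (1, h) :: pvShift (pvChanges (h :: t)) := by
          simp [pvStarts, pvFirstStart, pvShift]
        rw [hhd]
        norm_num

-- ===== VERDICT =====
theorem compress_singletons_spec : Claim_equal_compress_singletons := by
  intro s _
  show compress_singletons s = compress_singletons_alt s
  rw [compress_alt_eq, compress_singletons, foldl_pvStep_split, foldl_pvUpStep_nil,
    pvUppers_eq_pvRle]
  rfl
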